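-- pv_equiv track=rewrite | github.com/rabialex/cryptopal-challenges | Set_1/challenge3.py | commonLeterScore
-- ===== SOURCE A (Python) =====
-- def commonLeterScore(string):
--     commonLetters = "ETAOINSHRDLU"
--     vowels = 'aeiou'
--
--     score = 0
--     for c in string:
--         if c.upper() in commonLetters:
--             score += 1
--         if c in vowels:
--             score += 1
--     return score
-- ===== SOURCE B (Python) =====
-- def commonLeterScore(string):
--     commonLetters = "ETAOINSHRDLU"
--     vowels = 'aeiou'
--     counts = {}
--     for ch in string:
--         counts[ch] = counts.get(ch, 0) + 1
--     score = 0
--     for ch, n in counts.items():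
--         if ch.upper() in commonLetters:
--             score += n
--         if ch in vowels:
--             score += n
--     return score
-- ===== Notes on version B (the rewrite author's own statement) =====
-- stated objective: alternative
-- what changed: B first builds a character-frequency table (one dict pass), then scores each DISTINCT character once, adding its multiplicity per matching test, instead of A's per-character two-test loop.
import Mathlib
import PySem

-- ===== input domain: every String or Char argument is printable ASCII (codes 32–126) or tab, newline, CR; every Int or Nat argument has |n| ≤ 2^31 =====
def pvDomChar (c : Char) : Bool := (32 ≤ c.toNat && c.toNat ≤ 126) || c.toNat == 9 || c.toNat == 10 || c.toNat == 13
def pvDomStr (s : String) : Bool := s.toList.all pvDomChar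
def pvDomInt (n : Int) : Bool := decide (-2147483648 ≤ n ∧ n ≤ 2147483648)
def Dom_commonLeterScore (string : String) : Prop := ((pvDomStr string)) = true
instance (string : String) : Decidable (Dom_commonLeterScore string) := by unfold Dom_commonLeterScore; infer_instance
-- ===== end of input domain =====

-- B groups the string into a character-frequency table first and scores each distinct
-- character once weighted by its multiplicity (alternative decomposition, same cost).

-- ===== PORT A =====
-- 'c.upper() in commonLetters' on the one-char string c is exactly char membership
-- of upperChar c in the letters; likewise 'c in vowels'.
def commonLeterScore (string : String) : Int :=
  string.toList.foldl
    (fun score c =>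
      let score := if "ETAOINSHRDLU".toList.contains (PySem.Chars.upperChar c) then score + 1 else score
      if "aeiou".toList.contains c then score + 1 else score)
    0

-- ===== PORT B =====
def commonLeterScore_alt (string : String) : Int :=
  let counts := string.toList.foldl (fun d ch => d.insert ch (d.getD ch 0 + 1)) (PySem.Dict.empty (κ := Char) (ν := Int))
  counts.items.foldl
    (fun score p =>
      let score := if "ETAOINSHRDLU".toList.contains (PySem.Chars.upperChar p.1) then score + p.2 else score
      if "aeiou".toList.contains p.1 then score + p.2 else score)
    0

-- ===== PRECONDITION & SPEC =====
def Spec_commonLeterScore (string : String) (out : Int) : Prop := out = commonLeterScore_alt string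
instance (string : String) (out : Int) : Decidable (Spec_commonLeterScore string out) := by unfold Spec_commonLeterScore; infer_instance

-- ===== CLAIM (what is proved, stated in full; the proofs are below) =====
def Claim_equal_commonLeterScore : Prop := ∀ (string : String), Dom_commonLeterScore string → Spec_commonLeterScore string (commonLeterScore string)

-- ===== LEMMAS AND PROOFS =====

-- per-character weight shared by both scoring passes
def pvW (c : Char) : Int :=
  (if "ETAOINSHRDLU".toList.contains (PySem.Chars.upperChar c) then 1 else 0) +
  (if "aeiou".toList.contains c then 1 else 0)

theorem pv_indicator_sum_zero (c : Char) (d : List Char) (h : c ∉ d) :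
    (d.map (fun k => if k = c then pvW k else 0)).sum = 0 := by
  induction d with
  | nil => simp
  | cons a t ih =>
    simp only [List.mem_cons, not_or] at h
    simp [ih h.2, Ne.symm h.1]

theorem pv_indicator_sum (c : Char) (d : List Char) (hn : d.Nodup) (hc : c ∈ d) :
    (d.map (fun k => if k = c then pvW k else 0)).sum = pvW c := by
  induction d with
  | nil => cases hc
  | cons a t ih =>
    rcases List.mem_cons.mp hc with h | h
    · subst h
      have : c ∉ t := (List.nodup_cons.mp hn).1
      simp [pv_indicator_sum_zero c t this]
    · have hn' := (List.nodup_cons.mp hn).2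
      have hac : a ≠ c := fun e => (List.nodup_cons.mp hn).1 (e ▸ h)
      simp [ih hn' h, hac]

theorem pv_count_sum (l d : List Char) (hsub : ∀ x ∈ l, x ∈ d) (hn : d.Nodup) :
    (d.map (fun k => (l.count k : Int) * pvW k)).sum = (l.map pvW).sum := by
  induction l with
  | nil => simp
  | cons c t ih =>
    have hsub' : ∀ x ∈ t, x ∈ d := fun x hx => hsub x (List.mem_cons_of_mem _ hx)
    have hc : c ∈ d := hsub c (List.mem_cons_self ..)
    have hstep : (fun k => ((c :: t).count k : Int) * pvW k)
        = fun k => (t.count k : Int) * pvW k + (if k = c then pvW k else 0) := by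
      funext k
      rcases eq_or_ne k c with h | h
      · subst h; simp; ring
      · simp [h, Ne.symm h]
    rw [hstep]
    simp only [List.sum_map_add] at *
    rw [ih hsub', pv_indicator_sum c d hn hc]
    exact add_comm _ _

theorem commonLeterScore_spec : Claim_equal_commonLeterScore := by
  intro s _
  unfold Spec_commonLeterScore commonLeterScore commonLeterScore_alt
  set l := s.toList with hl
  -- A side: fold = sum of weights
  have hA : l.foldl
      (fun score c =>
        let score := if "ETAOINSHRDLU".toList.contains (PySem.Chars.upperChar c) then score + 1 else score
        if "aeiou".toList.contains c then score + 1 else score) 0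
      = (l.map pvW).sum := by
    have hf : (fun score c =>
        let score := if "ETAOINSHRDLU".toList.contains (PySem.Chars.upperChar c) then score + 1 else score
        if "aeiou".toList.contains c then score + 1 else score)
        = fun (acc : Int) c => acc + pvW c := by
      funext acc c
      simp only [pvW]
      split_ifs <;> ring
    rw [hf, PySem.List.foldl_add]
    simp
  -- B side: counter items fold = sum over distinct chars of count * weight
  have hB : (l.foldl (fun d ch => d.insert ch (d.getD ch 0 + 1)) (PySem.Dict.empty (κ := Char) (ν := Int))).items.foldl
      (fun score p =>
        let score := if "ETAOINSHRDLU".toList.contains (PySem.Chars.upperChar p.1) then score + p.2 else score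
        if "aeiou".toList.contains p.1 then score + p.2 else score) 0
      = ((PySem.Set.ofList l).map (fun k => (l.count k : Int) * pvW k)).sum := by
    rw [PySem.Dict.foldl_insert_getD_add_one_eq_counter, PySem.Dict.items_counter]
    have hg : (fun (acc : Int) (p : Char × Int) =>
        let score := if "ETAOINSHRDLU".toList.contains (PySem.Chars.upperChar p.1) then acc + p.2 else acc
        if "aeiou".toList.contains p.1 then score + p.2 else score)
        = fun acc p => acc + p.2 * pvW p.1 := by
      funext acc p
      simp only [pvW]
      split_ifs <;> ring
    rw [hg, PySem.List.foldl_add]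
    simp [List.map_map, Function.comp_def]
  rw [hA, hB]
  exact (pv_count_sum l (PySem.Set.ofList l)
    (fun x hx => (PySem.Set.mem_ofList _ _).mpr hx) (PySem.Set.nodup_ofList l)).symm
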